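-- pv_equiv track=rewrite | github.com/Zian00/NTU | Year 1/y1s2/SC1007 Data Structure and Algorithm/assignment/assignment3/find_smallest_number_greater_target.py | find_smallest_greater
-- ===== SOURCE A (Python) =====
-- def find_smallest_greater(arr, x):
--     # issue with the code is if x is not inside the list but in the range, it will return -1. which is wrong
--     # insert your codes here
--     low, high = 0, len(arr) - 1
--     result = -1  # Default if target not found
--     while low <= high:
--         mid = (low + high) // 2
--         if arr[mid] == x and x == arr[len(arr)-1]:
--             return -1
--         elif arr[mid] == x:
--             return arr[mid+1]
--         elif arr[mid] < x:
--             low = mid + 1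
--
--         else:
--             high = mid - 1
--     return result
-- ===== SOURCE B (Python) =====
-- def find_smallest_greater(arr, x):
--     # Recursive divide-and-conquer binary search with the same midpoint trajectory.
--     if not arr:
--         return -1
--     last = arr[-1]
--
--     def go(lo, hi):
--         if lo > hi:
--             return -1
--         mid = (lo + hi) // 2
--         v = arr[mid]
--         if v < x:
--             return go(mid + 1, hi)
--         if v > x:
--             return go(lo, mid - 1)
--         return -1 if x == last else arr[mid + 1]
--
--     return go(0, len(arr) - 1)
-- ===== Notes on version B (the rewrite author's own statement) =====
-- stated objective: alternative
-- what changed: Replaces the iterative while-loop with mutable low/high/result state by a recursive divide-and-conquer helper over (lo, hi) that hoists the empty-array case and the last element out, and dispatches on v<x / v>x / v==x instead of A's equality-first chain.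
import Mathlib
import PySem

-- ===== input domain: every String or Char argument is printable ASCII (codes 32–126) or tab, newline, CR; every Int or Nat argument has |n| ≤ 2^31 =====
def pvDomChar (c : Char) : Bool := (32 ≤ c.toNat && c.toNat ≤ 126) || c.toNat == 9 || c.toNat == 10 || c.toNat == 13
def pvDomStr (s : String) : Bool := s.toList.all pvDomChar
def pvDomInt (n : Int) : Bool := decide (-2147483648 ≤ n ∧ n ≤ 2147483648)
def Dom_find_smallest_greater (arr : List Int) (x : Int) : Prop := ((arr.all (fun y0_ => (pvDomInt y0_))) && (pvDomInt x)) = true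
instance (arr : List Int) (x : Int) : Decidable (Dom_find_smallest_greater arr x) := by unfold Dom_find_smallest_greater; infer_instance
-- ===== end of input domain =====

-- B rewrites A's iterative while-loop binary search as a recursive divide-and-conquer
-- helper with the same midpoint trajectory; same asymptotic cost (alternative decomposition).


-- ===== PORT A =====
-- A's while-loop as a fuel-indexed tail recursion over the mutable state (low, high);
-- fuel arr.length + 1 always suffices (high - low strictly decreases each iteration).
def findLoopA (arr : List Int) (x : Int) : Nat → Int → Int → Int
  | 0, _, _ => -1
  | fuel + 1, low, high =>
    if low ≤ high then
      let mid := PySem.Int.floordiv (low + high) 2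
      if PySem.List.pyGetD arr mid 0 = x ∧ x = PySem.List.pyGetD arr ((arr.length : Int) - 1) 0 then
        -1
      else if PySem.List.pyGetD arr mid 0 = x then
        PySem.List.pyGetD arr (mid + 1) 0
      else if PySem.List.pyGetD arr mid 0 < x then
        findLoopA arr x fuel (mid + 1) high
      else
        findLoopA arr x fuel low (mid - 1)
    else -1

def find_smallest_greater (arr : List Int) (x : Int) : Int :=
  findLoopA arr x (arr.length + 1) 0 ((arr.length : Int) - 1)

-- ===== PORT B =====
-- B's recursive helper go(lo, hi), well-founded on the interval length.
def goB (arr : List Int) (x last : Int) (lo hi : Int) : Int :=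
  if hgt : lo > hi then -1
  else
    let mid := PySem.Int.floordiv (lo + hi) 2
    have hb := PySem.Int.floordiv_two_mid_bounds (lo := lo) (hi := hi) (by omega)
    let v := PySem.List.pyGetD arr mid 0
    if v < x then goB arr x last (mid + 1) hi
    else if v > x then goB arr x last lo (mid - 1)
    else if x = last then -1 else PySem.List.pyGetD arr (mid + 1) 0
termination_by (hi + 1 - lo).toNat
decreasing_by
  · omega
  · omega

def find_smallest_greater_alt (arr : List Int) (x : Int) : Int :=
  if arr = [] then -1
  else
    let last := PySem.List.pyGetD arr (-1) 0
    goB arr x last 0 ((arr.length : Int) - 1)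

-- ===== PRECONDITION & SPEC =====
def Spec_find_smallest_greater (arr : List Int) (x : Int) (out : Int) : Prop := out = find_smallest_greater_alt arr x
instance (arr : List Int) (x : Int) (out : Int) : Decidable (Spec_find_smallest_greater arr x out) := by unfold Spec_find_smallest_greater; infer_instance

-- ===== CLAIM (what is proved, stated in full; the proofs are below) =====
def Claim_equal_find_smallest_greater : Prop := ∀ (arr : List Int) (x : Int), Dom_find_smallest_greater arr x → Spec_find_smallest_greater arr x (find_smallest_greater arr x)

-- ===== LEMMAS AND PROOFS =====

lemma findLoopA_eq_goB (arr : List Int) (x : Int) (fuel : Nat) (lo hi : Int)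
    (hfuel : (hi + 1 - lo).toNat ≤ fuel) :
    findLoopA arr x fuel lo hi = goB arr x (PySem.List.pyGetD arr ((arr.length : Int) - 1) 0) lo hi := by
  induction fuel generalizing lo hi with
  | zero =>
    have : lo > hi := by omega
    rw [goB]
    simp [findLoopA, this]
  | succ f ih =>
    rw [goB, findLoopA]
    by_cases hle : lo ≤ hi
    · have hb := PySem.Int.floordiv_two_mid_bounds (lo := lo) (hi := hi) hle
      simp only [hle, if_true, show ¬ lo > hi by omega, dite_false]
      set mid := PySem.Int.floordiv (lo + hi) 2 with hmid
      by_cases heq : PySem.List.pyGetD arr mid 0 = x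
      · simp [heq]
      · have hne1 : ¬ (PySem.List.pyGetD arr mid 0 = x ∧ x = PySem.List.pyGetD arr ((arr.length : Int) - 1) 0) := by
          intro h; exact heq h.1
        simp only [heq]
        by_cases hlt : PySem.List.pyGetD arr mid 0 < x
        · simp only [hlt, if_true, show ¬ x < PySem.List.pyGetD arr mid 0 by omega, if_false]
          exact ih (mid + 1) hi (by omega)
        · simp only [hlt, if_false, show x < PySem.List.pyGetD arr mid 0 by omega, if_true]
          exact ih lo (mid - 1) (by omega)
    · simp [hle, show lo > hi by omega]

lemma pyGetD_last_eq (arr : List Int) (h : arr ≠ []) :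
    PySem.List.pyGetD arr ((arr.length : Int) - 1) 0 = PySem.List.pyGetD arr (-1) 0 := by
  have hlen : 1 ≤ arr.length := List.length_pos_iff.mpr h
  simp [PySem.List.pyGetD, PySem.List.pyGet?, PySem.List.pyIdx?, hlen]

-- ===== VERDICT (by name: the statement is the Claim_ definition above) =====
theorem find_smallest_greater_spec : Claim_equal_find_smallest_greater := by
  intro arr x _
  unfold Spec_find_smallest_greater find_smallest_greater find_smallest_greater_alt
  by_cases hnil : arr = []
  · subst hnil; simp [findLoopA]
  · simp only [hnil, if_false]
    rw [findLoopA_eq_goB arr x (arr.length + 1) 0 ((arr.length : Int) - 1) (by omega),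
        pyGetD_last_eq arr hnil]
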